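-- pv_equiv track=rewrite | github.com/heshes1/surfacesnap | checks.py | _classify_tls_failure_type
-- ===== SOURCE A (Python) =====
-- def _classify_tls_failure_type(
--     verification_error: str | None,
--     expired: bool = False,
--     issuer_str: str | None = None,
--     subject_str: str | None = None,
-- ) -> str | None:
--     """Normalize backend-specific TLS failures into stable categories."""
--     error_lower = verification_error.lower() if verification_error else ""
--     if expired:
--         return "expired"
--     if issuer_str and subject_str and issuer_str == subject_str:
--         return "self_signed"
--     if any(
--         marker in error_lower
--         for marker in (
--             "hostname",
--             "doesn't match",
--             "does not match",
--             "not valid for",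
--             "certificate is not valid for",
--         )
--     ):
--         return "hostname_mismatch"
--     if verification_error:
--         if any(
--             marker in error_lower
--             for marker in (
--                 "self-signed",
--                 "self signed",
--                 "not trusted",
--                 "untrusted",
--                 "unable to get local issuer certificate",
--                 "unable to get issuer certificate",
--                 "unknown ca",
--                 "root certificate which is not trusted",
--                 "trust provider",
--                 "certificate chain",
--             )
--         ):
--             return "untrusted"
--         if any(
--             marker in error_lower
--             for marker in (
--                 "handshake failure",
--                 "sslv3 alert handshake failure",
--                 "tlsv1 alert protocol version",
--                 "wrong version number",
--                 "unsupported protocol",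
--                 "alert protocol version",
--             )
--         ):
--             return "protocol_failure"
--         return "other"
--     return None
-- ===== SOURCE B (Python) =====
-- # Flat marker->category table: one pass collects every matching category,
-- # then a fixed priority list resolves which category wins.
-- _MARKER_CATEGORY = (
--     ("hostname", "hostname_mismatch"),
--     ("doesn't match", "hostname_mismatch"),
--     ("does not match", "hostname_mismatch"),
--     ("not valid for", "hostname_mismatch"),
--     ("certificate is not valid for", "hostname_mismatch"),
--     ("self-signed", "untrusted"),
--     ("self signed", "untrusted"),
--     ("not trusted", "untrusted"),
--     ("untrusted", "untrusted"),
--     ("unable to get local issuer certificate", "untrusted"),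
--     ("unable to get issuer certificate", "untrusted"),
--     ("unknown ca", "untrusted"),
--     ("root certificate which is not trusted", "untrusted"),
--     ("trust provider", "untrusted"),
--     ("certificate chain", "untrusted"),
--     ("handshake failure", "protocol_failure"),
--     ("sslv3 alert handshake failure", "protocol_failure"),
--     ("tlsv1 alert protocol version", "protocol_failure"),
--     ("wrong version number", "protocol_failure"),
--     ("unsupported protocol", "protocol_failure"),
--     ("alert protocol version", "protocol_failure"),
-- )
--
-- _PRIORITY = ("hostname_mismatch", "untrusted", "protocol_failure")
--
--
-- def _classify_tls_failure_type(
--     verification_error: str | None,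
--     expired: bool = False,
--     issuer_str: str | None = None,
--     subject_str: str | None = None,
-- ) -> str | None:
--     """Normalize backend-specific TLS failures into stable categories."""
--     if expired:
--         return "expired"
--     if issuer_str and subject_str and issuer_str == subject_str:
--         return "self_signed"
--     if not verification_error:
--         return None
--     error_lower = verification_error.lower()
--     hits = [cat for marker, cat in _MARKER_CATEGORY if marker in error_lower]
--     for cat in _PRIORITY:
--         if cat in hits:
--             return cat
--     return "other"
-- ===== Notes on version B (the rewrite author's own statement) =====
-- stated objective: alternative
-- what changed: Instead of short-circuiting through three per-category any()-chains, B scans a single flat marker->category table once, collecting every category whose marker occurs in the lowered error, and then resolves the winner by a separate fixed priority list, with an unmatched fallback category.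
import Mathlib
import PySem

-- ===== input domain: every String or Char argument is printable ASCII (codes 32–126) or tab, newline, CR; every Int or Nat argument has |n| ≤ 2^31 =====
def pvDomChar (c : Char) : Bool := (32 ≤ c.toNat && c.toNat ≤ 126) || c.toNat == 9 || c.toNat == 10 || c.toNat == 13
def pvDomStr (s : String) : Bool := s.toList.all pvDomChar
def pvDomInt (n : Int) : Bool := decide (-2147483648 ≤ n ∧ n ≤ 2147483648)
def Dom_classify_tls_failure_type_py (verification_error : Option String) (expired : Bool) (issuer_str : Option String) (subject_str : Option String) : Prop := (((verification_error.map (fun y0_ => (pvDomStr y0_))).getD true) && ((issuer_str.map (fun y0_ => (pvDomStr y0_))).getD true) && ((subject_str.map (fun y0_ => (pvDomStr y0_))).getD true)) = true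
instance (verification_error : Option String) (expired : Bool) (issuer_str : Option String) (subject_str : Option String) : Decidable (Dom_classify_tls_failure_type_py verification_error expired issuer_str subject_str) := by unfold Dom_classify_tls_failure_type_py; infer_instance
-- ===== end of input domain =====

-- B replaces A's three short-circuiting per-category any()-chains by one pass over a flat
-- marker->category table collecting all matching categories, then a priority-list resolution
-- (objective: alternative decomposition, same cost).

-- Python truthiness of an Optional[str]: None and "" are falsy.
def pvStrOptTruthy (o : Option String) : Bool :=
  match o with
  | none => false
  | some s => !(s == "")

-- ===== PORT A =====
def classify_tls_failure_type_py (verification_error : Option String) (expired : Bool) (issuer_str : Option String) (subject_str : Option String) : Option String :=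
  let error_lower : String :=
    if pvStrOptTruthy verification_error then PySem.Str.lower (verification_error.getD "") else ""
  if expired then some "expired"
  else if pvStrOptTruthy issuer_str && pvStrOptTruthy subject_str
          && (issuer_str.getD "" == subject_str.getD "") then some "self_signed"
  else if (["hostname", "doesn't match", "does not match", "not valid for",
            "certificate is not valid for"] : List String).any
            (fun marker => PySem.Str.isIn marker error_lower) then some "hostname_mismatch"
  else if pvStrOptTruthy verification_error then
    if (["self-signed", "self signed", "not trusted", "untrusted",
         "unable to get local issuer certificate", "unable to get issuer certificate",
         "unknown ca", "root certificate which is not trusted", "trust provider",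
         "certificate chain"] : List String).any
         (fun marker => PySem.Str.isIn marker error_lower) then some "untrusted"
    else if (["handshake failure", "sslv3 alert handshake failure",
              "tlsv1 alert protocol version", "wrong version number",
              "unsupported protocol", "alert protocol version"] : List String).any
              (fun marker => PySem.Str.isIn marker error_lower) then some "protocol_failure"
    else some "other"
  else none

-- ===== PORT B =====
-- flat marker -> category table (B's _MARKER_CATEGORY)
def tlsMarkerCategory : List (String × String) :=
  [("hostname", "hostname_mismatch"),
   ("doesn't match", "hostname_mismatch"),
   ("does not match", "hostname_mismatch"),
   ("not valid for", "hostname_mismatch"),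
   ("certificate is not valid for", "hostname_mismatch"),
   ("self-signed", "untrusted"),
   ("self signed", "untrusted"),
   ("not trusted", "untrusted"),
   ("untrusted", "untrusted"),
   ("unable to get local issuer certificate", "untrusted"),
   ("unable to get issuer certificate", "untrusted"),
   ("unknown ca", "untrusted"),
   ("root certificate which is not trusted", "untrusted"),
   ("trust provider", "untrusted"),
   ("certificate chain", "untrusted"),
   ("handshake failure", "protocol_failure"),
   ("sslv3 alert handshake failure", "protocol_failure"),
   ("tlsv1 alert protocol version", "protocol_failure"),
   ("wrong version number", "protocol_failure"),
   ("unsupported protocol", "protocol_failure"),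
   ("alert protocol version", "protocol_failure")]

def tlsPriority : List String := ["hostname_mismatch", "untrusted", "protocol_failure"]

-- B's 'for cat in _PRIORITY: if cat in hits: return cat' loop
def pvFirstIn (hits : List String) : List String → Option String
  | [] => none
  | c :: rest => if hits.contains c then some c else pvFirstIn hits rest

def classify_tls_failure_type_py_alt (verification_error : Option String) (expired : Bool) (issuer_str : Option String) (subject_str : Option String) : Option String :=
  if expired then some "expired"
  else if pvStrOptTruthy issuer_str && pvStrOptTruthy subject_str
          && (issuer_str.getD "" == subject_str.getD "") then some "self_signed"
  else if !pvStrOptTruthy verification_error then none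
  else
    let error_lower := PySem.Str.lower (verification_error.getD "")
    let hits := (tlsMarkerCategory.filter
      (fun p => PySem.Str.isIn p.1 error_lower)).map Prod.snd
    match pvFirstIn hits tlsPriority with
    | some c => some c
    | none => some "other"

-- ===== PRECONDITION & SPEC =====
def Spec_classify_tls_failure_type_py (verification_error : Option String) (expired : Bool) (issuer_str : Option String) (subject_str : Option String) (out : Option String) : Prop := out = classify_tls_failure_type_py_alt verification_error expired issuer_str subject_str
instance (verification_error : Option String) (expired : Bool) (issuer_str : Option String) (subject_str : Option String) (out : Option String) : Decidable (Spec_classify_tls_failure_type_py verification_error expired issuer_str subject_str out) := by unfold Spec_classify_tls_failure_type_py; infer_instance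

-- ===== CLAIM =====
def Claim_equal_classify_tls_failure_type_py : Prop := ∀ (verification_error : Option String) (expired : Bool) (issuer_str : Option String) (subject_str : Option String), Dom_classify_tls_failure_type_py verification_error expired issuer_str subject_str → Spec_classify_tls_failure_type_py verification_error expired issuer_str subject_str (classify_tls_failure_type_py verification_error expired issuer_str subject_str)

-- ===== LEMMAS AND PROOFS =====

-- membership in the mapped filtered table, as a single any over the table
theorem contains_map_filter (l : List (String × String)) (p : String × String → Bool) (c : String) :
    (((l.filter p).map Prod.snd).contains c) = l.any (fun x => p x && x.2 == c) := by
  induction l with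
  | nil => rfl
  | cons hd tl ih =>
    by_cases hp : p hd = true
    · rw [List.filter_cons_of_pos hp]
      by_cases hc : (hd.2 == c) = true
      · have hce := eq_of_beq hc; subst hce
        simp [List.any_cons, hp]
      · have hc' : (c == hd.2) = false := by
          cases h2 : c == hd.2
          · rfl
          · exact absurd (by rw [eq_of_beq h2]; exact beq_self_eq_true _) hc
        simpa [List.any_cons, hp, hc, hc'] using ih
    · rw [List.filter_cons_of_neg hp]
      simpa [List.any_cons, hp] using ih

-- B's collect-then-prioritize equals A's nested any-chains, for any error text
theorem pvFirstIn_table (e : String) :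
    (match pvFirstIn ((tlsMarkerCategory.filter
        (fun p => PySem.Str.isIn p.1 e)).map Prod.snd) tlsPriority with
     | some c => some c
     | none => some "other") =
    if (["hostname", "doesn't match", "does not match", "not valid for",
         "certificate is not valid for"] : List String).any
         (fun marker => PySem.Str.isIn marker e) then some "hostname_mismatch"
    else if (["self-signed", "self signed", "not trusted", "untrusted",
              "unable to get local issuer certificate", "unable to get issuer certificate",
              "unknown ca", "root certificate which is not trusted", "trust provider",
              "certificate chain"] : List String).any
              (fun marker => PySem.Str.isIn marker e) then some "untrusted"
    else if (["handshake failure", "sslv3 alert handshake failure",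
              "tlsv1 alert protocol version", "wrong version number",
              "unsupported protocol", "alert protocol version"] : List String).any
              (fun marker => PySem.Str.isIn marker e) then some "protocol_failure"
    else some "other" := by
  simp only [tlsPriority, pvFirstIn, contains_map_filter, tlsMarkerCategory, List.any_cons,
    List.any_nil, String.reduceBEq, Bool.and_true, Bool.and_false, Bool.false_or, Bool.or_false]
  split_ifs <;> rfl

-- ===== VERDICT =====
theorem classify_tls_failure_type_py_spec : Claim_equal_classify_tls_failure_type_py := by
  intro ve expired iss sub _
  unfold Spec_classify_tls_failure_type_py classify_tls_failure_type_py classify_tls_failure_type_py_alt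
  by_cases hex : expired = true
  · simp [hex]
  · simp only [Bool.not_eq_true] at hex
    subst hex
    simp only [if_neg Bool.false_ne_true]
    by_cases hss : (pvStrOptTruthy iss && pvStrOptTruthy sub && (iss.getD "" == sub.getD "")) = true
    · simp [hss]
    · simp only [if_neg hss]
      cases hve : pvStrOptTruthy ve
      · -- falsy error: error_lower = "", no nonempty marker matches
        simp only [if_neg Bool.false_ne_true, Bool.not_false, if_true]
        decide
      · simp only [Bool.not_true, if_neg Bool.false_ne_true, if_true]
        exact (pvFirstIn_table (PySem.Str.lower (ve.getD ""))).symm
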